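-- pv_equiv track=rewrite | github.com/AMITJ10/careercanvas-maintenance- | backend/app.py | _normalize_markdown_headings
-- ===== SOURCE A (Python) =====
-- def _normalize_markdown_headings(md: str) -> str:
--     # Convert patterns like "Title\n=====..." into "### Title"
--     lines = (md or "").splitlines()
--     output = []
--     i = 0
--     while i < len(lines):
--         line = lines[i].rstrip()
--         if i + 1 < len(lines):
--             underline = lines[i + 1].strip()
--             if set(underline) <= set("=") and len(underline) >= 3:
--                 output.append(f"### {line.strip('* ').strip()}")
--                 i += 2
--                 continue
--             if set(underline) <= set("-") and len(underline) >= 3: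
--                 output.append(f"### {line.strip('* ').strip()}")
--                 i += 2
--                 continue
--         # Convert bold heading style like **Title** to ## style
--         if line.startswith("**") and line.endswith("**") and len(line) > 4:
--             output.append(f"### {line.strip('* ')}")
--         else:
--             output.append(line)
--         i += 1
--     return "\n".join(output)
-- ===== SOURCE B (Python) =====
-- def _is_heading_underline(s: str) -> bool:
--     u = s.strip()
--     return len(u) >= 3 and (all(c == "=" for c in u) or all(c == "-" for c in u))
--
--
-- def _normalize_markdown_headings(md: str) -> str:
--     # Treat the lines as a stack (first line on top): pop a line, and if the
--     # new top is an underline of '='s or '-'s, consume it too and emit a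
--     # "### " heading; otherwise rewrite a bold **Title** line or keep it as is.
--     stack = list(reversed(md.splitlines()))
--     out = []
--     while stack:
--         line = stack.pop().rstrip()
--         if stack and _is_heading_underline(stack[-1]):
--             stack.pop()
--             out.append("### " + line.strip("* ").strip())
--         elif line.startswith("**") and line.endswith("**") and len(line) > 4:
--             out.append("### " + line.strip("* "))
--         else:
--             out.append(line)
--     return "\n".join(out)
-- ===== Notes on version B (the rewrite author's own statement) =====
-- stated objective: alternative
-- what changed: Replaces the index-advancing while loop with lookahead and a skip-two-lines jump by a stack-consumption pass: the lines are pushed on a stack, each step pops one line and, if the new top is an equals/dash underline, pops that too; the set-inclusion underline test becomes an all-same-character test.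
import Mathlib
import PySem

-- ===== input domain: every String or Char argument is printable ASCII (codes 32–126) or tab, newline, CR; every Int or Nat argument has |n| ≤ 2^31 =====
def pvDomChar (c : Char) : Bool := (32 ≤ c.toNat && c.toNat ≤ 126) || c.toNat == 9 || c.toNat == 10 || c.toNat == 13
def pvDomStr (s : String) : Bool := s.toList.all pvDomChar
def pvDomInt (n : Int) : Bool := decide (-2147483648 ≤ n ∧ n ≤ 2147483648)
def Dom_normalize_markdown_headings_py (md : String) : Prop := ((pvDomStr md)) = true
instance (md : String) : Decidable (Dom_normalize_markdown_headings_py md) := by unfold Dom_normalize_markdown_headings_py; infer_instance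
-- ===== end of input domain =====

-- B replaces A's index-advancing scan (with lookahead and continue) by a stack-consumption pass (alternative decomposition, same cost).

-- ===== PORT A =====
-- the while loop of A: i-indexed scan; output.append → output ++ [·]; 'continue' → recursive call with i+2
def pvALoop (lines : List (List Char)) (i : Nat) (output : List (List Char)) : List (List Char) :=
  if h : i < lines.length then
    let line := PySem.Chars.rstrip lines[i]
    -- the bold-heading fallthrough shared by both paths below (hoisted, same values)
    let plainOut :=
      if PySem.Chars.startswith line ['*','*'] && PySem.Chars.endswith line ['*','*'] && decide (4 < line.length) then
        "### ".toList ++ PySem.Chars.stripChars line ['*',' ']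
      else line
    if h2 : i + 1 < lines.length then
      let underline := PySem.Chars.strip lines[i+1]
      if PySem.Set.issubset (PySem.Set.ofList underline) (PySem.Set.ofList ['=']) && decide (3 ≤ underline.length) then
        pvALoop lines (i+2) (output ++ ["### ".toList ++ PySem.Chars.strip (PySem.Chars.stripChars line ['*',' '])])
      else if PySem.Set.issubset (PySem.Set.ofList underline) (PySem.Set.ofList ['-']) && decide (3 ≤ underline.length) then
        pvALoop lines (i+2) (output ++ ["### ".toList ++ PySem.Chars.strip (PySem.Chars.stripChars line ['*',' '])])
      else
        pvALoop lines (i+1) (output ++ [plainOut])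
    else
      pvALoop lines (i+1) (output ++ [plainOut])
  else output
termination_by lines.length - i

-- '(md or "")' equals md for strings (the empty string is its own fallback)
def normalize_markdown_headings_py (md : String) : String :=
  String.ofList (PySem.Chars.join ['\n'] (pvALoop (PySem.Chars.splitlines md.toList) 0 []))

-- ===== PORT B =====
def pvIsHeadingUnderline (s : List Char) : Bool :=
  let u := PySem.Chars.strip s
  decide (3 ≤ u.length) && (u.all (· == '=') || u.all (· == '-'))

-- B's while loop over the stack. Python pushes the lines reversed and pops from
-- the end, so the top of the stack is the FIRST remaining line: the stack is the
-- list of remaining lines in original order, pop = head, peek stack[-1] = head of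
-- the tail. Each step produces one output line and the remaining stack.
-- the elif/else tail of the loop body (emits the bold rewrite or the line itself)
def pvEmit (line : List Char) : List Char :=
  if PySem.Chars.startswith line ['*','*'] && PySem.Chars.endswith line ['*','*'] && decide (4 < line.length) then
    "### ".toList ++ PySem.Chars.stripChars line ['*',' ']
  else line

def pvBLoop : List (List Char) → List (List Char)
  | [] => []
  | raw :: stack =>
    let line := PySem.Chars.rstrip raw
    match stack with
    | u :: rest =>
      if pvIsHeadingUnderline u then
        ("### ".toList ++ PySem.Chars.strip (PySem.Chars.stripChars line ['*',' '])) :: pvBLoop rest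
      else
        pvEmit line :: pvBLoop (u :: rest)
    | [] => [pvEmit line]

def normalize_markdown_headings_py_alt (md : String) : String :=
  String.ofList (PySem.Chars.join ['\n'] (pvBLoop (PySem.Chars.splitlines md.toList)))

-- ===== PRECONDITION & SPEC =====
def Spec_normalize_markdown_headings_py (md : String) (out : String) : Prop := out = normalize_markdown_headings_py_alt md
instance (md : String) (out : String) : Decidable (Spec_normalize_markdown_headings_py md out) := by unfold Spec_normalize_markdown_headings_py; infer_instance

-- ===== CLAIM (what is proved, stated in full; the proofs are below) =====
def Claim_equal_normalize_markdown_headings_py : Prop := ∀ (md : String), Dom_normalize_markdown_headings_py md → Spec_normalize_markdown_headings_py md (normalize_markdown_headings_py md)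

-- ===== LEMMAS AND PROOFS =====

-- A's two set-inclusion underline tests, combined, equal B's all-'='/'-' test
lemma pv_under_eq (u : List Char) :
    ((PySem.Set.issubset (PySem.Set.ofList u) (PySem.Set.ofList ['=']) && decide (3 ≤ u.length)) ||
     (PySem.Set.issubset (PySem.Set.ofList u) (PySem.Set.ofList ['-']) && decide (3 ≤ u.length)))
    = (decide (3 ≤ u.length) && (u.all (· == '=') || u.all (· == '-'))) := by
  rw [Bool.eq_iff_iff]
  simp only [Bool.or_eq_true, Bool.and_eq_true, decide_eq_true_eq,
    PySem.Set.issubset_iff, PySem.Set.mem_ofList, List.all_eq_true, beq_iff_eq,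
    List.mem_cons, List.not_mem_nil, or_false]
  tauto

lemma pvBLoop_nil : pvBLoop [] = [] := rfl
lemma pvBLoop_single (raw : List Char) : pvBLoop [raw] = [pvEmit (PySem.Chars.rstrip raw)] := rfl
lemma pvBLoop_cons₂ (raw u : List Char) (rest : List (List Char)) :
    pvBLoop (raw :: u :: rest) =
      if pvIsHeadingUnderline u then
        ("### ".toList ++ PySem.Chars.strip (PySem.Chars.stripChars (PySem.Chars.rstrip raw) ['*',' '])) :: pvBLoop rest
      else
        pvEmit (PySem.Chars.rstrip raw) :: pvBLoop (u :: rest) := rfl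

lemma pvALoop_eq (lines : List (List Char)) :
    ∀ k i output, lines.length ≤ i + k →
      pvALoop lines i output = output ++ pvBLoop (lines.drop i) := by
  intro k
  induction k with
  | zero =>
    intro i output h
    rw [pvALoop]
    have hi : ¬ i < lines.length := by omega
    simp [hi, List.drop_eq_nil_of_le (by omega : lines.length ≤ i), pvBLoop_nil]
  | succ k ih =>
    intro i output h
    rw [pvALoop]
    by_cases hi : i < lines.length
    · simp only [hi, dif_pos]
      by_cases h2 : i + 1 < lines.length
      · simp only [h2, dif_pos]
        rw [List.drop_eq_getElem_cons hi, List.drop_eq_getElem_cons h2]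
        have hu := pv_under_eq (PySem.Chars.strip lines[i+1])
        by_cases c1 : (PySem.Set.issubset (PySem.Set.ofList (PySem.Chars.strip lines[i+1])) (PySem.Set.ofList ['=']) && decide (3 ≤ (PySem.Chars.strip lines[i+1]).length)) = true
        · have hiu : pvIsHeadingUnderline lines[i+1] = true := by
            rw [pvIsHeadingUnderline, ← hu]; simp [c1]
          rw [if_pos c1, ih (i+2) _ (by omega), pvBLoop_cons₂, if_pos hiu]
          simp [List.append_assoc]
        · by_cases c2 : (PySem.Set.issubset (PySem.Set.ofList (PySem.Chars.strip lines[i+1])) (PySem.Set.ofList ['-']) && decide (3 ≤ (PySem.Chars.strip lines[i+1]).length)) = true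
          · have hiu : pvIsHeadingUnderline lines[i+1] = true := by
              rw [pvIsHeadingUnderline, ← hu]; simp [c2]
            rw [if_neg c1, if_pos c2, ih (i+2) _ (by omega), pvBLoop_cons₂, if_pos hiu]
            simp [List.append_assoc]
          · have hiu : pvIsHeadingUnderline lines[i+1] = false := by
              rw [pvIsHeadingUnderline, ← hu]
              simp only [Bool.or_eq_false_iff]
              exact ⟨by simpa using c1, by simpa using c2⟩
            rw [if_neg c1, if_neg c2, ih (i+1) _ (by omega)]
            rw [pvBLoop_cons₂,
              if_neg (show ¬(pvIsHeadingUnderline lines[i+1] = true) by simp [hiu])]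
            simp [pvEmit, List.append_assoc]
      · have hlast : lines.drop (i+1) = [] := List.drop_eq_nil_of_le (by omega)
        simp only [h2, dif_neg, not_false_iff]
        rw [ih (i+1) _ (by omega), List.drop_eq_getElem_cons hi, hlast, pvBLoop_single]
        simp [pvEmit, pvBLoop_nil]
    · simp [hi, List.drop_eq_nil_of_le (by omega : lines.length ≤ i), pvBLoop_nil]

-- ===== VERDICT (by name: the statement is the Claim_ definition above) =====
theorem normalize_markdown_headings_py_spec : Claim_equal_normalize_markdown_headings_py := by
  intro md _
  unfold Spec_normalize_markdown_headings_py normalize_markdown_headings_py normalize_markdown_headings_py_alt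
  rw [pvALoop_eq _ (PySem.Chars.splitlines md.toList).length 0 [] (by omega)]
  simp
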